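-- pv_equiv track=rewrite | github.com/alma-frankenstein/therapyMarkov | statementGenerator.py | capitalizer
-- ===== SOURCE A (Python) =====
-- def capitalizer(statementString):
--     statementString = statementString.split(" ")
--     for index in range(len(statementString)):
--         if index == 0:
--             statementString[index] = statementString[index].title()
--         elif statementString[index-1].endswith('.') or statementString[index-1].endswith('?') or statementString[index-1].endswith('!') or statementString[index] == "I" or statementString[index] == "I'm" or statementString[index] == "I'd" or statementString[index] == "I'll":
--             statementString[index] = statementString[index].title()
--         else:
--             statementString[index] = statementString[index].lower()
--     statementString = " ".join(statementString)
--     if not statementString[len(statementString)-1].endswith('.'):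
--         statementString = statementString.rstrip() + "."
--     return statementString
-- ===== SOURCE B (Python) =====
-- def capitalizer(statementString):
--     words = statementString.split(" ")
--     # stage 1: group the words into sentence segments, each ending at a word
--     # that ends in '.', '?' or '!' (the trailing segment may lack one)
--     segments = []
--     current = []
--     for w in words:
--         current.append(w)
--         if w.endswith(('.', '?', '!')):
--             segments.append(current)
--             current = []
--     if current:
--         segments.append(current)
--     # stage 2: per segment, title-case the first word; later words are
--     # lowercased unless they are a first-person pronoun form
--     pronouns = {"I", "I'm", "I'd", "I'll"}
--     out = []
--     for seg in segments:
--         out.append(seg[0].title())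
--         for w in seg[1:]:
--             out.append(w.title() if w in pronouns else w.lower())
--     result = " ".join(out)
--     if not result.endswith('.'):
--         result = result.rstrip() + '.'
--     return result
-- ===== Notes on version B (the rewrite author's own statement) =====
-- stated objective: alternative
-- what changed: A is one in-place index loop over the word list that re-reads the mutated previous entry arr[index-1] to decide each word's case; B is two staged passes over different structure: it first groups the words into sentence segments (each ending at a word ending in '.', '?' or '!'), then transforms each segment independently (title the first word, lowercase the rest except first-person pronoun forms) and flattens; correct because case-mapping never changes a word's final punctuation character.
import Mathlib
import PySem

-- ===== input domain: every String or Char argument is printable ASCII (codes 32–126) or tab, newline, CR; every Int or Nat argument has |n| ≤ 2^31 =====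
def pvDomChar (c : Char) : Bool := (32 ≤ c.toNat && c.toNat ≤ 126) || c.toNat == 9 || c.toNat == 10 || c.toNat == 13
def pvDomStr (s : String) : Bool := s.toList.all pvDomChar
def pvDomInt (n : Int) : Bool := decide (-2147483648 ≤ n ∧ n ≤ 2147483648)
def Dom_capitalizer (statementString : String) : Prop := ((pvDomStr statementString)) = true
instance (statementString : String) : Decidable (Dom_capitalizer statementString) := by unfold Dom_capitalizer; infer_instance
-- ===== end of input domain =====

-- B replaces A's single in-place index loop (which re-reads the mutated previous word) by two
-- staged passes: first group the words into sentence segments ending at '.','?','!', then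
-- transform each segment (title its first word, lowercase the rest except pronoun forms); simpler.

-- Python str.title(), ported by hand (shared by both ports, each Python calls .title()):
-- exact on ASCII, where the cased characters are exactly a-z/A-Z (PySem.Chars.isalpha).
def pyTitleGo : Bool → List Char → List Char
  | _, [] => []
  | prevAlpha, c :: rest =>
      (if PySem.Chars.isalpha c then
        (if prevAlpha then PySem.Chars.lowerChar c else PySem.Chars.upperChar c)
       else c) :: pyTitleGo (PySem.Chars.isalpha c) rest

def pyTitle (s : String) : String := String.ofList (pyTitleGo false s.toList)

-- ===== PORT A =====
-- the body of A's `for index in range(len(statementString))` loop, mutating the word list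
def capA_step (arr : List String) (index : Nat) : List String :=
  if index = 0 then
    arr.set index (pyTitle (arr.getD index ""))
  else if PySem.Str.endswith (arr.getD (index - 1) "") "." || PySem.Str.endswith (arr.getD (index - 1) "") "?"
      || PySem.Str.endswith (arr.getD (index - 1) "") "!" || (arr.getD index "" == "I")
      || (arr.getD index "" == "I'm") || (arr.getD index "" == "I'd") || (arr.getD index "" == "I'll") then
    arr.set index (pyTitle (arr.getD index ""))
  else
    arr.set index (PySem.Str.lower (arr.getD index ""))

def capitalizer (statementString : String) : String :=
  let words := (PySem.Str.split? statementString " ").getD []   -- sep " " ≠ "": always some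
  let arr := (List.range words.length).foldl capA_step words
  let joined := PySem.Str.join " " arr
  -- statementString[len(statementString)-1]: IndexError (none) iff joined = "", excluded by Pre_
  match PySem.Str.pyGet? joined ((PySem.Str.len joined : Int) - 1) with
  | none => joined
  | some c =>
    if PySem.Str.endswith (String.ofList [c]) "." then joined
    else PySem.Str.rstrip joined ++ "."

-- ===== PORT B =====
-- w.endswith(('.', '?', '!'))
def capB_endsP (w : String) : Bool :=
  PySem.Str.endswith w "." || PySem.Str.endswith w "?" || PySem.Str.endswith w "!"

-- stage-1 loop body: append w to current; flush current into segments at a sentence ender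
def capB_groupStep (st : List (List String) × List String) (w : String) :
    List (List String) × List String :=
  let cur := st.2 ++ [w]
  if capB_endsP w then (st.1 ++ [cur], []) else (st.1, cur)

def capB_pronouns : PySem.Set String := PySem.Set.ofList ["I", "I'm", "I'd", "I'll"]

-- the conditional expression of stage 2's inner loop
def capB_rest (v : String) : String :=
  if PySem.Set.contains capB_pronouns v then pyTitle v else PySem.Str.lower v

-- stage-2 body for one segment: seg[0].title(), then the inner loop over seg[1:]
def capB_transSeg : List String → List String
  | [] => []                                 -- unreachable: segments are never empty
  | w :: rest => pyTitle w :: rest.map capB_rest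

def capitalizer_alt (statementString : String) : String :=
  let words := (PySem.Str.split? statementString " ").getD []
  let st := words.foldl capB_groupStep ([], [])
  let segments := if st.2 = [] then st.1 else st.1 ++ [st.2]
  let out := segments.flatMap capB_transSeg
  let result := PySem.Str.join " " out
  if PySem.Str.endswith result "." then result else PySem.Str.rstrip result ++ "."

-- ===== PRECONDITION & SPEC =====
-- Pre_ excludes only the empty string, on which A's final indexing raises IndexError.
def Pre_capitalizer (statementString : String) : Prop := statementString ≠ ""
instance (statementString : String) : Decidable (Pre_capitalizer statementString) := by
  unfold Pre_capitalizer; infer_instance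

def pvWitness_capitalizer : String := "it's me. i'll go"

def Spec_capitalizer (statementString : String) (out : String) : Prop := out = capitalizer_alt statementString
instance (statementString : String) (out : String) : Decidable (Spec_capitalizer statementString out) := by unfold Spec_capitalizer; infer_instance

-- ===== CLAIM (what is proved, stated in full; the proofs are below) =====
def Claim_equal_capitalizer : Prop := ∀ (statementString : String), Dom_capitalizer statementString → Pre_capitalizer statementString → Spec_capitalizer statementString (capitalizer statementString)

-- ===== LEMMAS AND PROOFS =====

-- ---- character-level case-map lemmas ----
theorem pv_islower_shift (x : Char) (h : PySem.Chars.isupper x = true) :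
    PySem.Chars.islower (Char.ofNat (x.toNat + 32)) = true := by
  simp only [PySem.Chars.isupper, PySem.Chars.islower, Bool.and_eq_true, decide_eq_true_eq,
    Char.le_def, UInt32.le_iff_toNat_le] at *
  have cA : ('A' : Char).val.toNat = 65 := rfl
  have cZ : ('Z' : Char).val.toNat = 90 := rfl
  have ca : ('a' : Char).val.toNat = 97 := rfl
  have cz : ('z' : Char).val.toNat = 122 := rfl
  have hv : (x.toNat + 32).isValidChar := by left; show _ < 55296; unfold Char.toNat; omega
  have ht : (Char.ofNat (x.toNat + 32)).toNat = x.toNat + 32 := by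
    rw [Char.toNat_ofNat, if_pos hv]
  unfold Char.toNat at *
  constructor <;> omega

theorem pv_isupper_shift (x : Char) (h : PySem.Chars.islower x = true) :
    PySem.Chars.isupper (Char.ofNat (x.toNat - 32)) = true := by
  simp only [PySem.Chars.isupper, PySem.Chars.islower, Bool.and_eq_true, decide_eq_true_eq,
    Char.le_def, UInt32.le_iff_toNat_le] at *
  have cA : ('A' : Char).val.toNat = 65 := rfl
  have cZ : ('Z' : Char).val.toNat = 90 := rfl
  have ca : ('a' : Char).val.toNat = 97 := rfl
  have cz : ('z' : Char).val.toNat = 122 := rfl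
  have hv : (x.toNat - 32).isValidChar := by left; show _ < 55296; unfold Char.toNat; omega
  have ht : (Char.ofNat (x.toNat - 32)).toNat = x.toNat - 32 := by
    rw [Char.toNat_ofNat, if_pos hv]
  unfold Char.toNat at *
  constructor <;> omega

theorem pv_isalpha_lowerChar (x : Char) (h : PySem.Chars.isalpha x = true) :
    PySem.Chars.isalpha (PySem.Chars.lowerChar x) = true := by
  unfold PySem.Chars.lowerChar
  split
  · next hu => simp [PySem.Chars.isalpha, pv_islower_shift x hu]
  · exact h

theorem pv_isalpha_upperChar (x : Char) (h : PySem.Chars.isalpha x = true) :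
    PySem.Chars.isalpha (PySem.Chars.upperChar x) = true := by
  unfold PySem.Chars.upperChar
  split
  · next hu => simp [PySem.Chars.isalpha, pv_isupper_shift x hu]
  · exact h

theorem pv_lowerChar_eq_iff (x c : Char) (hc : PySem.Chars.isalpha c = false) :
    PySem.Chars.lowerChar x = c ↔ x = c := by
  by_cases hx : PySem.Chars.isalpha x = true
  · constructor
    · intro h; exact absurd (h ▸ pv_isalpha_lowerChar x hx) (by simp [hc])
    · rintro rfl; exact absurd hx (by simp [hc])
  · have : PySem.Chars.lowerChar x = x := by
      unfold PySem.Chars.lowerChar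
      rw [if_neg]
      intro hu; exact hx (by simp [PySem.Chars.isalpha, hu])
    rw [this]

theorem pv_upperChar_eq_iff (x c : Char) (hc : PySem.Chars.isalpha c = false) :
    PySem.Chars.upperChar x = c ↔ x = c := by
  by_cases hx : PySem.Chars.isalpha x = true
  · constructor
    · intro h; exact absurd (h ▸ pv_isalpha_upperChar x hx) (by simp [hc])
    · rintro rfl; exact absurd hx (by simp [hc])
  · have : PySem.Chars.upperChar x = x := by
      unfold PySem.Chars.upperChar
      rw [if_neg]
      intro hu; exact hx (by simp [PySem.Chars.isalpha, hu])
    rw [this]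

-- ---- last-character preservation by title/lower ----
theorem pv_endswith_single (s : List Char) (c : Char) :
    PySem.Chars.endswith s [c] = true ↔ s.getLast? = some c := by
  rw [PySem.Chars.endswith_iff, List.getLast?_eq_some_iff]
  constructor
  · rintro ⟨t, rfl⟩; exact ⟨t, rfl⟩
  · rintro ⟨t, rfl⟩; exact ⟨t, rfl⟩

theorem pv_getLast?_pyTitleGo (c : Char) (hc : PySem.Chars.isalpha c = false) :
    ∀ (cs : List Char) (b : Bool),
      ((pyTitleGo b cs).getLast? = some c ↔ cs.getLast? = some c) := by
  intro cs
  induction cs with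
  | nil => intro b; simp [pyTitleGo]
  | cons x t ih =>
    intro b
    cases t with
    | nil =>
      simp only [pyTitleGo, List.getLast?_singleton, Option.some.injEq]
      split
      · next hx =>
        split
        · rw [pv_lowerChar_eq_iff x c hc]
        · rw [pv_upperChar_eq_iff x c hc]
      · exact Iff.rfl
    | cons y u =>
      have h1 : pyTitleGo b (x :: y :: u) =
          (if PySem.Chars.isalpha x then
            (if b then PySem.Chars.lowerChar x else PySem.Chars.upperChar x)
           else x) :: pyTitleGo (PySem.Chars.isalpha x) (y :: u) := rfl
      rw [h1]
      have h2 : pyTitleGo (PySem.Chars.isalpha x) (y :: u) =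
          (if PySem.Chars.isalpha y then
            (if PySem.Chars.isalpha x then PySem.Chars.lowerChar y else PySem.Chars.upperChar y)
           else y) :: pyTitleGo (PySem.Chars.isalpha y) u := rfl
      rw [h2, List.getLast?_cons_cons, ← h2, List.getLast?_cons_cons]
      exact ih (PySem.Chars.isalpha x)

theorem pv_getLast?_lower (c : Char) (hc : PySem.Chars.isalpha c = false) (cs : List Char) :
    ((PySem.Chars.lower cs).getLast? = some c ↔ cs.getLast? = some c) := by
  unfold PySem.Chars.lower
  rw [List.getLast?_map]
  cases h : cs.getLast? with
  | none => simp
  | some x => simp [pv_lowerChar_eq_iff x c hc]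

-- endswith of a punctuation mark is invariant under title() and lower()
theorem pv_endswith_pyTitle (w : String) (c : Char) (hc : PySem.Chars.isalpha c = false) :
    PySem.Str.endswith (pyTitle w) (String.ofList [c]) = PySem.Str.endswith w (String.ofList [c]) := by
  rw [Bool.eq_iff_iff, PySem.Str.endswith_eq, PySem.Str.endswith_eq]
  simp only [pyTitle, String.toList_ofList]
  rw [pv_endswith_single, pv_endswith_single, pv_getLast?_pyTitleGo c hc]

theorem pv_endswith_lower (w : String) (c : Char) (hc : PySem.Chars.isalpha c = false) :
    PySem.Str.endswith (PySem.Str.lower w) (String.ofList [c]) = PySem.Str.endswith w (String.ofList [c]) := by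
  rw [Bool.eq_iff_iff, PySem.Str.endswith_eq, PySem.Str.endswith_eq]
  simp only [PySem.Str.toList_lower, String.toList_ofList]
  rw [pv_endswith_single, pv_endswith_single, pv_getLast?_lower c hc]

-- ---- the common word-level description pv_gT (proof artifact relating both ports) ----
-- the per-word transform with its (original) predecessor
def pv_capF : Option String → String → String
  | none, w => pyTitle w
  | some q, w =>
      if capB_endsP q || PySem.Set.contains capB_pronouns w then pyTitle w
      else PySem.Str.lower w

def pv_gT : Option String → List String → List String
  | _, [] => []
  | prev, w :: rest => pv_capF prev w :: pv_gT (some w) rest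

theorem pv_capF_or (p : Option String) (w : String) :
    pv_capF p w = pyTitle w ∨ pv_capF p w = PySem.Str.lower w := by
  cases p with
  | none => exact Or.inl rfl
  | some q =>
    by_cases h : (capB_endsP q || PySem.Set.contains capB_pronouns w) = true
    · exact Or.inl (by simp only [pv_capF]; rw [if_pos h])
    · exact Or.inr (by simp only [pv_capF]; rw [if_neg h])

theorem pv_endsP_capF (p : Option String) (w : String) :
    capB_endsP (pv_capF p w) = capB_endsP w := by
  have hdot : "." = String.ofList ['.'] := rfl
  have hq : "?" = String.ofList ['?'] := rfl
  have hb : "!" = String.ofList ['!'] := rfl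
  unfold capB_endsP
  rcases pv_capF_or p w with h | h <;> rw [h]
  · rw [hdot, hq, hb,
      pv_endswith_pyTitle w '.' rfl, pv_endswith_pyTitle w '?' rfl, pv_endswith_pyTitle w '!' rfl]
  · rw [hdot, hq, hb,
      pv_endswith_lower w '.' rfl, pv_endswith_lower w '?' rfl, pv_endswith_lower w '!' rfl]

theorem pv_gT_length : ∀ (prev : Option String) (ws : List String),
    (pv_gT prev ws).length = ws.length := by
  intro prev ws
  induction ws generalizing prev with
  | nil => rfl
  | cons w t ih => simp [pv_gT, ih]

theorem pv_gT_snoc : ∀ (xs : List String) (prev : Option String) (w : String),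
    pv_gT prev (xs ++ [w]) =
      pv_gT prev xs ++ [pv_capF (match xs.getLast? with | none => prev | some p => some p) w] := by
  intro xs
  induction xs with
  | nil => intro prev w; rfl
  | cons x t ih =>
    intro prev w
    simp only [List.cons_append, pv_gT, ih (some x), List.getLast?_cons]
    cases t.getLast? <;> simp

theorem pv_capF_none (w : String) : pv_capF none w = pyTitle w := rfl

theorem pv_take_getLast? (ws : List String) (k : Nat) (h : k < ws.length) :
    (ws.take (k + 1)).getLast? = some ws[k] := by
  rw [List.take_add_one, List.getElem?_eq_getElem h]
  exact List.getLast?_concat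

-- ---- A's fold equals pv_gT ----
set_option maxHeartbeats 1000000 in
theorem pv_fold_inv (ws : List String) :
    ∀ i, i ≤ ws.length →
      (List.range i).foldl capA_step ws = pv_gT none (ws.take i) ++ ws.drop i := by
  intro i
  induction i with
  | zero => intro _; simp [pv_gT]
  | succ j ih =>
    intro hle
    have hj : j < ws.length := by omega
    rw [List.range_succ, List.foldl_append, ih (by omega)]
    simp only [List.foldl_cons, List.foldl_nil]
    have hpl : (pv_gT none (ws.take j)).length = j := by
      rw [pv_gT_length]; rw [List.length_take]; omega
    have hdrop : ws.drop j = ws[j] :: ws.drop (j + 1) := List.drop_eq_getElem_cons hj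
    have hgetj : (pv_gT none (ws.take j) ++ ws.drop j).getD j "" = ws[j] := by
      rw [List.getD_eq_getElem?_getD, List.getElem?_append_right (by omega), hpl]
      simp [List.getElem?_eq_getElem hj]
    have hset : ∀ x, (pv_gT none (ws.take j) ++ ws.drop j).set j x
        = pv_gT none (ws.take j) ++ (x :: ws.drop (j + 1)) := by
      intro x
      rw [List.set_append, if_neg (by omega), hpl, Nat.sub_self, hdrop]
      rfl
    have htake : ws.take (j + 1) = ws.take j ++ [ws[j]] := by
      rw [List.take_add_one, List.getElem?_eq_getElem hj]; rfl
    cases j with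
    | zero =>
      unfold capA_step
      rw [if_pos rfl, hgetj, hset (pyTitle ws[0]), htake]
      simp [pv_gT, pv_capF_none]
    | succ k =>
      have hk : k < ws.length := by omega
      have htk : ws.take (k + 1) = ws.take k ++ [ws[k]] := by
        rw [List.take_add_one, List.getElem?_eq_getElem hk]; rfl
      -- the word at index (k+1)-1 of the current state is the transformed ws[k]
      have hprefk : ∃ q, (pv_gT none (ws.take (k + 1)) ++ ws.drop (k + 1)).getD (k + 1 - 1) ""
          = pv_capF q ws[k] := by
        refine ⟨(match (ws.take k).getLast? with | none => (none : Option String) | some p => some p), ?_⟩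
        rw [List.getD_eq_getElem?_getD]
        have hlk : (pv_gT none (ws.take k)).length = k := by
          rw [pv_gT_length]; rw [List.length_take]; omega
        rw [htk, pv_gT_snoc]
        have : ((pv_gT none (ws.take k) ++ [pv_capF (match (ws.take k).getLast? with
              | none => (none : Option String) | some p => some p) ws[k]]) ++ ws.drop (k + 1))
            = pv_gT none (ws.take k) ++ ([pv_capF (match (ws.take k).getLast? with
              | none => (none : Option String) | some p => some p) ws[k]] ++ ws.drop (k + 1)) := by
          simp
        rw [this, List.getElem?_append_right (by omega), hlk]
        simp
      obtain ⟨q, hq⟩ := hprefk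
      -- A's branch condition equals the pv_capF condition for the word ws[k+1]
      have hcond : (PySem.Str.endswith ((pv_gT none (ws.take (k + 1)) ++ ws.drop (k + 1)).getD (k + 1 - 1) "") "."
            || PySem.Str.endswith ((pv_gT none (ws.take (k + 1)) ++ ws.drop (k + 1)).getD (k + 1 - 1) "") "?"
            || PySem.Str.endswith ((pv_gT none (ws.take (k + 1)) ++ ws.drop (k + 1)).getD (k + 1 - 1) "") "!"
            || ((pv_gT none (ws.take (k + 1)) ++ ws.drop (k + 1)).getD (k + 1) "" == "I")
            || ((pv_gT none (ws.take (k + 1)) ++ ws.drop (k + 1)).getD (k + 1) "" == "I'm")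
            || ((pv_gT none (ws.take (k + 1)) ++ ws.drop (k + 1)).getD (k + 1) "" == "I'd")
            || ((pv_gT none (ws.take (k + 1)) ++ ws.drop (k + 1)).getD (k + 1) "" == "I'll"))
          = (capB_endsP ws[k] || PySem.Set.contains capB_pronouns ws[k + 1]) := by
        rw [hq, hgetj]
        have h1 : capB_endsP (pv_capF q ws[k]) = capB_endsP ws[k] := pv_endsP_capF q ws[k]
        have pron : PySem.Set.contains capB_pronouns ws[k + 1] =
            ((ws[k + 1] == "I") || (ws[k + 1] == "I'm") || (ws[k + 1] == "I'd") || (ws[k + 1] == "I'll")) := by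
          rw [Bool.eq_iff_iff]
          simp [capB_pronouns, PySem.Set.contains, PySem.Set.ofList, PySem.Set.add, or_assoc]
        unfold capB_endsP at h1
        rw [h1, pron]
        simp [capB_endsP, Bool.or_assoc]
      have hstep : pv_capF (some ws[k]) ws[k + 1] =
          if (capB_endsP ws[k] || PySem.Set.contains capB_pronouns ws[k + 1]) = true
          then pyTitle ws[k + 1] else PySem.Str.lower ws[k + 1] := rfl
      unfold capA_step
      rw [if_neg (by omega), hcond, hgetj]
      by_cases hc : (capB_endsP ws[k] || PySem.Set.contains capB_pronouns ws[k + 1]) = true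
      · rw [if_pos hc, hset, htake, pv_gT_snoc, pv_take_getLast? ws k hk]
        rw [hstep, if_pos hc]
        simp
      · rw [if_neg hc, hset, htake, pv_gT_snoc, pv_take_getLast? ws k hk]
        rw [hstep, if_neg hc]
        simp

theorem pv_fold_gT (ws : List String) :
    (List.range ws.length).foldl capA_step ws = pv_gT none ws := by
  have := pv_fold_inv ws ws.length (le_refl _)
  simpa using this

-- ---- B's staged grouping equals pv_gT ----
-- structural form of stage 1
def pv_segRec : List String → List String → List (List String)
  | cur, [] => if cur = [] then [] else [cur]
  | cur, w :: rest =>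
      if capB_endsP w then (cur ++ [w]) :: pv_segRec [] rest else pv_segRec (cur ++ [w]) rest

theorem pv_fold_shift : ∀ (ws : List String) (cur : List String) (segs : List (List String)),
    ws.foldl capB_groupStep (segs, cur)
      = (segs ++ (ws.foldl capB_groupStep ([], cur)).1, (ws.foldl capB_groupStep ([], cur)).2) := by
  intro ws
  induction ws with
  | nil => intro cur segs; simp
  | cons w rest ih =>
    intro cur segs
    simp only [List.foldl_cons]
    by_cases hw : capB_endsP w = true
    · have h1 : capB_groupStep (segs, cur) w = (segs ++ [cur ++ [w]], []) := by
        simp [capB_groupStep, hw]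
      have h2 : capB_groupStep ([], cur) w = ([cur ++ [w]], []) := by
        simp [capB_groupStep, hw]
      rw [h1, h2, ih [] (segs ++ [cur ++ [w]]), ih [] [cur ++ [w]]]
      simp
    · have h1 : capB_groupStep (segs, cur) w = (segs, cur ++ [w]) := by
        simp [capB_groupStep, hw]
      have h2 : capB_groupStep ([], cur) w = ([], cur ++ [w]) := by
        simp [capB_groupStep, hw]
      rw [h1, h2]
      exact ih _ segs

theorem pv_fold_segRec : ∀ (ws cur : List String),
    (if (ws.foldl capB_groupStep ([], cur)).2 = [] then (ws.foldl capB_groupStep ([], cur)).1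
     else (ws.foldl capB_groupStep ([], cur)).1 ++ [(ws.foldl capB_groupStep ([], cur)).2])
      = pv_segRec cur ws := by
  intro ws
  induction ws with
  | nil =>
    intro cur
    simp only [List.foldl_nil, pv_segRec]
    split <;> simp_all
  | cons w rest ih =>
    intro cur
    have hseg : pv_segRec cur (w :: rest)
        = if capB_endsP w then (cur ++ [w]) :: pv_segRec [] rest
          else pv_segRec (cur ++ [w]) rest := rfl
    simp only [List.foldl_cons]
    by_cases hw : capB_endsP w = true
    · have h2 : capB_groupStep ([], cur) w = ([cur ++ [w]], []) := by
        simp [capB_groupStep, hw]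
      rw [h2, pv_fold_shift rest [] [cur ++ [w]], hseg, if_pos hw, ← ih []]
      by_cases hz : (List.foldl capB_groupStep ([], []) rest).2 = [] <;> simp [hz]
    · have h2 : capB_groupStep ([], cur) w = ([], cur ++ [w]) := by
        simp [capB_groupStep, hw]
      rw [h2, hseg, if_neg hw]
      exact ih (cur ++ [w])

theorem pv_getLastD_mem (c0 : String) (cs : List String) : cs.getLastD c0 ∈ c0 :: cs := by
  cases hcs : cs.getLast? with
  | none =>
    have : cs = [] := List.getLast?_eq_none_iff.mp hcs
    subst this; simp
  | some x =>
    rw [List.getLastD_eq_getLast?, hcs]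
    exact List.mem_cons_of_mem c0 (List.mem_of_getLast? hcs)

theorem pv_capF_mid (p w : String) (hp : capB_endsP p = false) :
    pv_capF (some p) w = capB_rest w := by
  simp [pv_capF, capB_rest, hp]

theorem pv_capF_start (p : Option String)
    (hp : match p with | none => True | some q => capB_endsP q = true) (w : String) :
    pv_capF p w = pyTitle w := by
  cases p with
  | none => rfl
  | some q => simp only at hp; simp [pv_capF, hp]

-- the joint segment lemma: fresh-segment and mid-segment forms
theorem pv_seg_main : ∀ ws : List String,
    (∀ prev : Option String, (match prev with | none => True | some q => capB_endsP q = true) →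
      (pv_segRec [] ws).flatMap capB_transSeg = pv_gT prev ws)
    ∧ (∀ c0 cs, (∀ w ∈ c0 :: cs, capB_endsP w = false) →
        (pv_segRec (c0 :: cs) ws).flatMap capB_transSeg
          = pyTitle c0 :: (cs.map capB_rest ++ pv_gT (some (cs.getLastD c0)) ws)) := by
  intro ws
  induction ws with
  | nil =>
    constructor
    · intro prev _; rfl
    · intro c0 cs _
      simp [pv_segRec, pv_gT, capB_transSeg]
  | cons w rest ih =>
    obtain ⟨ihP, ihQ⟩ := ih
    constructor
    · intro prev hprev
      have hseg : pv_segRec [] (w :: rest)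
          = if capB_endsP w then [w] :: pv_segRec [] rest
            else pv_segRec [w] rest := by
        simp [pv_segRec]
      rw [hseg]
      simp only [pv_gT, pv_capF_start prev hprev w]
      by_cases hw : capB_endsP w = true
      · rw [if_pos hw]
        simp only [List.flatMap_cons, capB_transSeg, List.map_nil]
        rw [ihP (some w) hw]
        rfl
      · have hw' : capB_endsP w = false := by simpa using hw
        rw [if_neg hw]
        rw [ihQ w [] (by intro v hv; simp at hv; subst hv; exact hw')]
        simp
    · intro c0 cs hinv
      have hL : capB_endsP (cs.getLastD c0) = false := hinv _ (pv_getLastD_mem c0 cs)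
      have hseg : pv_segRec (c0 :: cs) (w :: rest)
          = if capB_endsP w then (c0 :: cs ++ [w]) :: pv_segRec [] rest
            else pv_segRec (c0 :: cs ++ [w]) rest := rfl
      rw [hseg]
      simp only [pv_gT, pv_capF_mid _ w hL]
      by_cases hw : capB_endsP w = true
      · rw [if_pos hw]
        simp only [List.flatMap_cons]
        rw [ihP (some w) hw]
        simp only [capB_transSeg]
        cases cs with
        | nil => simp
        | cons c1 ct => simp
      · rw [if_neg hw]
        have hw' : capB_endsP w = false := by simp [Bool.not_eq_true] at hw; exact hw
        have : c0 :: cs ++ [w] = c0 :: (cs ++ [w]) := by simp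
        rw [this, ihQ c0 (cs ++ [w]) (by
          intro v hv
          rcases List.mem_cons.mp hv with rfl | hv2
          · exact hinv v (by simp)
          · rcases List.mem_append.mp hv2 with h | h
            · exact hinv v (List.mem_cons_of_mem _ h)
            · simp at h; subst h; exact hw')]
        have hlast : (cs ++ [w]).getLastD c0 = w := by simp
        rw [hlast]
        simp

theorem pv_B_gT (ws : List String) :
    (if (ws.foldl capB_groupStep ([], [])).2 = [] then (ws.foldl capB_groupStep ([], [])).1
     else (ws.foldl capB_groupStep ([], [])).1 ++ [(ws.foldl capB_groupStep ([], [])).2]).flatMap capB_transSeg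
      = pv_gT none ws := by
  rw [pv_fold_segRec ws []]
  exact (pv_seg_main ws).1 none trivial

-- ---- length bookkeeping: the joined transformed string has the input's length ----
theorem pv_join_length_congr (sep : List Char) :
    ∀ (xs ys : List (List Char)), xs.map List.length = ys.map List.length →
      (PySem.Chars.join sep xs).length = (PySem.Chars.join sep ys).length := by
  intro xs
  induction xs with
  | nil =>
    intro ys h
    have : ys = [] := by cases ys <;> simp_all
    rw [this]
  | cons x t ih =>
    intro ys h
    cases ys with
    | nil => simp at h
    | cons y u =>
      simp only [List.map_cons, List.cons.injEq] at h
      cases t with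
      | nil =>
        have : u = [] := by cases u <;> simp_all
        subst this
        rw [PySem.Chars.join_singleton, PySem.Chars.join_singleton, h.1]
      | cons t0 tt =>
        cases u with
        | nil => simp at h
        | cons u0 uu =>
          rw [PySem.Chars.join_cons_cons, PySem.Chars.join_cons_cons]
          simp only [List.length_append, h.1]
          have := ih (u0 :: uu) h.2
          omega

-- go with any accumulator = accumulator ++ go with []
theorem pv_splitOn_go_acc (sep : List Char) :
    ∀ (fuel : Nat) (l cur : List Char) (acc : List (List Char)),
      PySem.Chars.splitOn.go sep fuel l cur acc =
        acc.reverse ++ PySem.Chars.splitOn.go sep fuel l cur [] := by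
  intro fuel
  induction fuel with
  | zero => intro l cur acc; simp [PySem.Chars.splitOn.go]
  | succ f ih =>
    intro l cur acc
    cases l with
    | nil => simp [PySem.Chars.splitOn.go]
    | cons c rest =>
      rw [PySem.Chars.splitOn.go, PySem.Chars.splitOn.go]
      split
      · rw [ih _ _ (cur.reverse :: acc), ih _ _ [cur.reverse]]
        simp
      · exact ih _ _ acc

theorem pv_splitOn_go_ne_nil (sep : List Char) :
    ∀ (fuel : Nat) (l cur : List Char) (acc : List (List Char)),
      PySem.Chars.splitOn.go sep fuel l cur acc ≠ [] := by
  intro fuel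
  induction fuel with
  | zero => intro l cur acc; simp [PySem.Chars.splitOn.go]
  | succ f ih =>
    intro l cur acc
    cases l with
    | nil => simp [PySem.Chars.splitOn.go]
    | cons c rest =>
      rw [PySem.Chars.splitOn.go]
      split
      · exact ih _ _ _
      · exact ih _ _ _

theorem pv_splitOn_go_join (sep : List Char) (hs : sep ≠ []) :
    ∀ (fuel : Nat) (l cur : List Char), l.length < fuel →
      PySem.Chars.join sep (PySem.Chars.splitOn.go sep fuel l cur []) = cur.reverse ++ l := by
  intro fuel
  induction fuel with
  | zero => intro l cur h; omega
  | succ f ih =>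
    intro l cur h
    cases l with
    | nil => simp [PySem.Chars.splitOn.go, PySem.Chars.join_singleton]
    | cons c rest =>
      rw [PySem.Chars.splitOn.go]
      split
      · next hpre =>
        rw [pv_splitOn_go_acc]
        have hnn := pv_splitOn_go_ne_nil sep f (List.drop sep.length (c :: rest)) [] []
        obtain ⟨p, ps, hps⟩ : ∃ p ps, PySem.Chars.splitOn.go sep f (List.drop sep.length (c :: rest)) [] [] = p :: ps := by
          cases hgo : PySem.Chars.splitOn.go sep f (List.drop sep.length (c :: rest)) [] [] with
          | nil => exact absurd hgo hnn
          | cons p ps => exact ⟨p, ps, rfl⟩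
        simp only [List.reverse_cons, List.reverse_nil, List.nil_append, List.singleton_append]
        rw [hps, PySem.Chars.join_cons_cons, ← hps]
        rw [ih _ _ (by
          have : 0 < sep.length := List.length_pos_of_ne_nil hs
          simp only [List.length_drop, List.length_cons] at *
          omega)]
        have heq : sep ++ List.drop sep.length (c :: rest) = c :: rest :=
          List.prefix_iff_eq_append.mp (List.isPrefixOf_iff_prefix.mp hpre)
        simp only [List.reverse_nil, List.nil_append, List.append_assoc]
        rw [heq]
      · rw [ih _ _ (by simp at h ⊢; omega)]
        simp

theorem pv_join_splitOn (cs sep : List Char) (hs : sep ≠ []) :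
    PySem.Chars.join sep (PySem.Chars.splitOn cs sep) = cs := by
  unfold PySem.Chars.splitOn
  rw [pv_splitOn_go_join sep hs _ _ _ (by omega)]
  simp

-- length of each transformed word equals the original word's length
theorem pv_len_capF (p : Option String) (w : String) :
    (pv_capF p w).toList.length = w.toList.length := by
  have htg : ∀ (cs : List Char) (b : Bool), (pyTitleGo b cs).length = cs.length := by
    intro cs
    induction cs with
    | nil => intro b; rfl
    | cons x t ih => intro b; simp [pyTitleGo, ih]
  rcases pv_capF_or p w with h | h <;> rw [h]
  · simp [pyTitle, htg]
  · simp [PySem.Str.toList_lower, PySem.Chars.lower]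

theorem pv_gT_len_map : ∀ (prev : Option String) (ws : List String),
    (pv_gT prev ws).map (fun w => w.toList.length) = ws.map (fun w => w.toList.length) := by
  intro prev ws
  induction ws generalizing prev with
  | nil => rfl
  | cons w t ih =>
    simp only [pv_gT, List.map_cons, List.cons.injEq]
    exact ⟨pv_len_capF prev w, ih (some w)⟩

-- ---- words, their reconstruction, and the nonemptiness of the joined string ----
theorem pv_words_toList (s : String) :
    ((PySem.Str.split? s " ").getD []).map String.toList = PySem.Chars.splitOn s.toList [' '] := by
  have h := PySem.Str.split?_map s " "
  have h2 : PySem.Chars.split? s.toList (" ".toList) = some (PySem.Chars.splitOn s.toList [' ']) := by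
    simp [PySem.Chars.split?]
  rw [h2] at h
  cases hsp : PySem.Str.split? s " " with
  | none => rw [hsp] at h; simp at h
  | some ys =>
    rw [hsp] at h
    simp only [Option.map_some, Option.some.injEq] at h
    simpa using h

theorem pv_R_len (s : String) :
    (PySem.Str.join " " (pv_gT none ((PySem.Str.split? s " ").getD []))).toList.length
      = s.toList.length := by
  rw [PySem.Str.toList_join]
  have hlen : (List.map String.toList (pv_gT none ((PySem.Str.split? s " ").getD []))).map List.length
      = (List.map String.toList ((PySem.Str.split? s " ").getD [])).map List.length := by
    simp only [List.map_map]
    exact pv_gT_len_map none ((PySem.Str.split? s " ").getD [])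
  rw [pv_join_length_congr (" ".toList) _ _ hlen]
  rw [pv_words_toList]
  have : (" ".toList : List Char) = [' '] := rfl
  rw [this, pv_join_splitOn s.toList [' '] (by simp)]

theorem pv_R_ne (s : String) (hpre : s ≠ "") :
    (PySem.Str.join " " (pv_gT none ((PySem.Str.split? s " ").getD []))).toList ≠ [] := by
  intro hnil
  have := pv_R_len s
  rw [hnil] at this
  have hs : s.toList = [] := List.length_eq_zero_iff.mp this.symm
  exact hpre (by simpa using hs)

-- ---- the two final-period branches agree on a nonempty joined string ----
theorem pv_final (R : String) (hne : R.toList ≠ []) :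
    (match PySem.Str.pyGet? R ((PySem.Str.len R : Int) - 1) with
     | none => R
     | some c =>
       if PySem.Str.endswith (String.ofList [c]) "." then R
       else PySem.Str.rstrip R ++ ".")
    = (if PySem.Str.endswith R "." then R else PySem.Str.rstrip R ++ ".") := by
  have hlen : 1 ≤ R.toList.length := by
    cases h : R.toList with
    | nil => exact absurd h hne
    | cons a l => simp
  have hcast : ((PySem.Str.len R : Int) - 1) = ((R.toList.length - 1 : Nat) : Int) := by
    rw [PySem.Str.len_eq]; omega
  have hget : PySem.Str.pyGet? R ((PySem.Str.len R : Int) - 1) = R.toList.getLast? := by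
    rw [PySem.Str.pyGet?_eq, PySem.Chars.pyGet?_eq_listPyGet?, hcast,
      PySem.List.pyGet?_natCast, List.getLast?_eq_getElem?]
  cases hg : R.toList.getLast? with
  | none => exact absurd (List.getLast?_eq_none_iff.mp hg) hne
  | some c =>
    rw [hget, hg]
    show (if PySem.Str.endswith (String.ofList [c]) "." = true then R
      else PySem.Str.rstrip R ++ ".") = _
    have hciff : PySem.Str.endswith (String.ofList [c]) "." = PySem.Str.endswith R "." := by
      rw [Bool.eq_iff_iff, PySem.Str.endswith_eq, PySem.Str.endswith_eq]
      have hd : ("." : String).toList = ['.'] := rfl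
      rw [hd]
      have h1 : (String.ofList [c]).toList = [c] := by simp
      rw [h1, pv_endswith_single, pv_endswith_single, hg]
      simp
    rw [hciff]

-- ===== VERDICT (by name: the statement is the Claim_ definition above) =====
set_option maxHeartbeats 1000000 in
theorem capitalizer_spec : Claim_equal_capitalizer := by
  intro s _ hpre
  unfold Spec_capitalizer
  simp only [capitalizer, capitalizer_alt]
  rw [pv_fold_gT, pv_B_gT]
  exact pv_final _ (pv_R_ne s hpre)
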